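-- pv_equiv track=rewrite | github.com/Aaronidicula/RoboticCompanion | Python_Assistant/fixed_assistant.py | topic_router
-- ===== SOURCE A (Python) =====
-- def topic_router(text: str) -> str | None:
--     text = text.lower()
--     if "photosynthesis" in text:
--         return "photosynthesis"
--     if any(w in text for w in ["sunflower", "sun flower", "heliotropism"]):
--         return "sunflower"
--     if any(w in text for w in ["school", "homework", "teacher", "exam", "study"]):
--         return "school"
--     if "joke" in text or "funny" in text or "tell me a joke" in text:
--         return "joke"
--     return None
-- ===== SOURCE B (Python) =====
-- # Keyword-indexed single scan: one pass over text positions, each keyword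
-- # looked up by startswith, keeping the minimum topic priority seen anywhere.
-- _KEYWORD_PRIORITY = {
--     "photosynthesis": 0,
--     "sunflower": 1, "sun flower": 1, "heliotropism": 1,
--     "school": 2, "homework": 2, "teacher": 2, "exam": 2, "study": 2,
--     "joke": 3, "funny": 3, "tell me a joke": 3,
-- }
-- _TOPICS = ("photosynthesis", "sunflower", "school", "joke")
--
-- def topic_router(text: str) -> str | None:
--     t = text.lower()
--     best = 4
--     for i in range(len(t)):
--         for kw, p in _KEYWORD_PRIORITY.items():
--             if t.startswith(kw, i):
--                 best = min(best, p)
--     return _TOPICS[best] if best < 4 else None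
-- ===== Notes on version B (the rewrite author's own statement) =====
-- stated objective: alternative
-- what changed: Replaced the branch chain of whole-text substring tests by a single scan over text positions: every keyword is checked by startswith at each position via a keyword-to-priority map, accumulating the minimum priority, and the topic is read off a priority-indexed tuple at the end.
import Mathlib
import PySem

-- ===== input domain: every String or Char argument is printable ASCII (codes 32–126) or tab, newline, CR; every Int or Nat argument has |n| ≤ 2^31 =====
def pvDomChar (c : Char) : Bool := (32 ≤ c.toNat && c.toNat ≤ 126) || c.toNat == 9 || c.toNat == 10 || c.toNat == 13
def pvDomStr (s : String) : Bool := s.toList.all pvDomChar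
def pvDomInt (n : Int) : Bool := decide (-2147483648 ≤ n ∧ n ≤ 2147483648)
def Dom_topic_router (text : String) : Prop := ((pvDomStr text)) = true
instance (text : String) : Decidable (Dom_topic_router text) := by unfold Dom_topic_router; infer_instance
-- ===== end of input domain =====

-- B replaces A's if-chain of whole-text substring tests by one scan over text
-- positions with a keyword→priority map and a running minimum priority (alternative, same cost).

-- ===== PORT A =====
def topic_router (text : String) : Option String :=
  let text := PySem.Str.lower text
  if PySem.Str.isIn "photosynthesis" text then some "photosynthesis"
  else if ["sunflower", "sun flower", "heliotropism"].any (fun w => PySem.Str.isIn w text) then some "sunflower"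
  else if ["school", "homework", "teacher", "exam", "study"].any (fun w => PySem.Str.isIn w text) then some "school"
  else if PySem.Str.isIn "joke" text || PySem.Str.isIn "funny" text || PySem.Str.isIn "tell me a joke" text then some "joke"
  else none

-- ===== PORT B =====
-- _KEYWORD_PRIORITY as an association list (insertion order), keywords as char lists
def kwPriority : List (List Char × Nat) :=
  [("photosynthesis".toList, 0),
   ("sunflower".toList, 1), ("sun flower".toList, 1), ("heliotropism".toList, 1),
   ("school".toList, 2), ("homework".toList, 2), ("teacher".toList, 2), ("exam".toList, 2), ("study".toList, 2),
   ("joke".toList, 3), ("funny".toList, 3), ("tell me a joke".toList, 3)]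

def topicsTuple : List String := ["photosynthesis", "sunflower", "school", "joke"]

-- inner loop body: 't.startswith(kw, i)' is 'kw is a prefix of t[i:]' (exact here: 0 ≤ i < len(t))
def scanPos (t : List Char) (best : Nat) (i : Nat) : Nat :=
  kwPriority.foldl (fun b kp => if PySem.Chars.startswith (t.drop i) kp.1 then min b kp.2 else b) best

def topic_router_alt (text : String) : Option String :=
  let t := (PySem.Str.lower text).toList
  let best := (List.range t.length).foldl (scanPos t) 4
  if best < 4 then PySem.List.pyGet? topicsTuple (best : Int) else none

-- ===== PRECONDITION & SPEC =====
def Spec_topic_router (text : String) (out : Option String) : Prop := out = topic_router_alt text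
instance (text : String) (out : Option String) : Decidable (Spec_topic_router text out) := by unfold Spec_topic_router; infer_instance

-- ===== CLAIM (what is proved, stated in full; the proofs are below) =====
def Claim_equal_topic_router : Prop := ∀ (text : String), Dom_topic_router text → Spec_topic_router text (topic_router text)

-- ===== LEMMAS AND PROOFS =====

-- inner fold: result ≤ p iff the accumulator already was, or some keyword matches here with priority ≤ p
theorem innerFold_le_iff (xs : List (List Char × Nat)) (s : List Char) (b p : Nat) :
    xs.foldl (fun b kp => if PySem.Chars.startswith s kp.1 then min b kp.2 else b) b ≤ p ↔
      b ≤ p ∨ ∃ kp ∈ xs, PySem.Chars.startswith s kp.1 = true ∧ kp.2 ≤ p := by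
  induction xs generalizing b with
  | nil => simp
  | cons hd tl ih =>
    simp only [List.foldl_cons]
    by_cases h : PySem.Chars.startswith s hd.1 = true
    · rw [if_pos h, ih]
      constructor
      · rintro (hb | ⟨kp, hm, hsw, hp⟩)
        · rcases min_le_iff.mp hb with h1 | h2
          · exact Or.inl h1
          · exact Or.inr ⟨hd, List.mem_cons_self, h, h2⟩
        · exact Or.inr ⟨kp, List.mem_cons_of_mem _ hm, hsw, hp⟩
      · rintro (hb | ⟨kp, hm, hsw, hp⟩)
        · exact Or.inl (min_le_iff.mpr (Or.inl hb))
        · rcases List.mem_cons.mp hm with rfl | hm'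
          · exact Or.inl (min_le_iff.mpr (Or.inr hp))
          · exact Or.inr ⟨kp, hm', hsw, hp⟩
    · rw [if_neg h, ih]
      constructor
      · rintro (hb | ⟨kp, hm, hsw, hp⟩)
        · exact Or.inl hb
        · exact Or.inr ⟨kp, List.mem_cons_of_mem _ hm, hsw, hp⟩
      · rintro (hb | ⟨kp, hm, hsw, hp⟩)
        · exact Or.inl hb
        · rcases List.mem_cons.mp hm with rfl | hm'
          · exact absurd hsw h
          · exact Or.inr ⟨kp, hm', hsw, hp⟩

-- outer fold over range: result ≤ p iff accumulator ≤ p or some position i < n matches with priority ≤ p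
theorem outerFold_le_iff (t : List Char) (n b p : Nat) :
    (List.range n).foldl (scanPos t) b ≤ p ↔
      b ≤ p ∨ ∃ i < n, ∃ kp ∈ kwPriority, PySem.Chars.startswith (t.drop i) kp.1 = true ∧ kp.2 ≤ p := by
  induction n generalizing b with
  | zero => simp
  | succ n ih =>
    rw [List.range_succ, List.foldl_append]
    simp only [List.foldl_cons, List.foldl_nil]
    rw [scanPos, innerFold_le_iff, ih]
    constructor
    · rintro ((hb | ⟨i, hi, w⟩) | ⟨kp, hm, hsw, hp⟩)
      · exact Or.inl hb
      · exact Or.inr ⟨i, Nat.lt_succ_of_lt hi, w⟩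
      · exact Or.inr ⟨n, Nat.lt_succ_self n, kp, hm, hsw, hp⟩
    · rintro (hb | ⟨i, hi, kp, hm, hsw, hp⟩)
      · exact Or.inl (Or.inl hb)
      · rcases Nat.lt_succ_iff_lt_or_eq.mp hi with hlt | rfl
        · exact Or.inl (Or.inr ⟨i, hlt, kp, hm, hsw, hp⟩)
        · exact Or.inr ⟨kp, hm, hsw, hp⟩

-- a nonempty keyword is a prefix of some drop i with i < length iff it is a substring
theorem exists_drop_prefix_iff (t kw : List Char) (hne : kw ≠ []) :
    (∃ i < t.length, kw <+: t.drop i) ↔ kw <:+: t := by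
  rw [← PySem.Chars.isIn_iff_infix, ← PySem.Chars.exists_prefix_drop_iff_isIn]
  constructor
  · rintro ⟨i, _, h⟩; exact ⟨i, h⟩
  · rintro ⟨j, h⟩
    refine ⟨j, ?_, h⟩
    by_contra hj
    rw [List.drop_eq_nil_of_le (Nat.le_of_not_lt hj)] at h
    exact hne (List.prefix_nil.mp h)

theorem kw_ne_nil (kp : List Char × Nat) (hm : kp ∈ kwPriority) : kp.1 ≠ [] := by
  revert hm; rw [kwPriority]; intro hm
  fin_cases hm <;> simp

-- best ≤ p iff some keyword of priority ≤ p occurs in t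
theorem best_le_iff (t : List Char) (p : Nat) :
    (List.range t.length).foldl (scanPos t) 4 ≤ p ↔
      4 ≤ p ∨ ∃ kp ∈ kwPriority, kp.2 ≤ p ∧ kp.1 <:+: t := by
  rw [outerFold_le_iff]
  refine or_congr Iff.rfl ?_
  constructor
  · rintro ⟨i, hi, kp, hm, hsw, hp⟩
    exact ⟨kp, hm, hp, (exists_drop_prefix_iff t kp.1 (kw_ne_nil kp hm)).mp
      ⟨i, hi, (PySem.Chars.startswith_iff _ _).mp hsw⟩⟩
  · rintro ⟨kp, hm, hp, hin⟩
    obtain ⟨i, hi, hpre⟩ := (exists_drop_prefix_iff t kp.1 (kw_ne_nil kp hm)).mpr hin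
    exact ⟨i, hi, kp, hm, (PySem.Chars.startswith_iff _ _).mpr hpre, hp⟩

-- ===== VERDICT (by name: the statement is the Claim_ definition above) =====
theorem topic_router_spec : Claim_equal_topic_router := by
  intro text _
  unfold Spec_topic_router topic_router topic_router_alt
  set s := PySem.Str.lower text with hs
  set t := s.toList with ht
  dsimp only
  set best := (List.range t.length).foldl (scanPos t) 4 with hbest
  have hle : ∀ p, best ≤ p ↔ 4 ≤ p ∨ ∃ kp ∈ kwPriority, kp.2 ≤ p ∧ kp.1 <:+: t :=
    fun p => best_le_iff t p
  have h4 : best ≤ 4 := (hle 4).mpr (Or.inl le_rfl)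
  have toT : ∀ w : String, PySem.Str.isIn w s = true ↔ w.toList <:+: t := by
    intro w; rw [ht]; exact PySem.Str.isIn_iff_infix w s
  have toF : ∀ w : String, ¬ w.toList <:+: t → PySem.Str.isIn w s = false := by
    intro w h; exact Bool.eq_false_iff.mpr (fun hh => h ((toT w).mp hh))
  by_cases c0 : "photosynthesis".toList <:+: t
  · have hb : best = 0 := Nat.le_zero.mp ((hle 0).mpr
      (Or.inr ⟨("photosynthesis".toList, 0), by simp [kwPriority], le_rfl, c0⟩))
    have b0 := (toT "photosynthesis").mpr c0
    rw [hb, b0]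
    simp [PySem.List.pyGet?, PySem.List.pyIdx?, topicsTuple]
  · have b0 := toF "photosynthesis" c0
    by_cases c1 : ("sunflower".toList <:+: t ∨ "sun flower".toList <:+: t ∨ "heliotropism".toList <:+: t)
    · have h1 : best ≤ 1 := by
        refine (hle 1).mpr (Or.inr ?_)
        rcases c1 with h | h | h
        · exact ⟨("sunflower".toList, 1), by simp [kwPriority], le_rfl, h⟩
        · exact ⟨("sun flower".toList, 1), by simp [kwPriority], le_rfl, h⟩
        · exact ⟨("heliotropism".toList, 1), by simp [kwPriority], le_rfl, h⟩
      have h0 : ¬ best ≤ 0 := by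
        rw [hle 0]
        rintro (h | ⟨kp, hm, hp, hin⟩)
        · omega
        · revert hm; rw [kwPriority]; intro hm
          fin_cases hm <;> simp_all
      have hb : best = 1 := by omega
      have b1 : (["sunflower", "sun flower", "heliotropism"].any (fun w => PySem.Str.isIn w s)) = true := by
        simp only [List.any_cons, List.any_nil, Bool.or_eq_true]
        rcases c1 with h | h | h
        · exact Or.inl ((toT _).mpr h)
        · exact Or.inr (Or.inl ((toT _).mpr h))
        · exact Or.inr (Or.inr (Or.inl ((toT _).mpr h)))
      rw [hb, b0, b1]
      simp [PySem.List.pyGet?, PySem.List.pyIdx?, topicsTuple]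
    · have b1 : (["sunflower", "sun flower", "heliotropism"].any (fun w => PySem.Str.isIn w s)) = false := by
        simp only [List.any_cons, List.any_nil, Bool.or_eq_false_iff]
        exact ⟨toF _ (fun h => c1 (Or.inl h)), toF _ (fun h => c1 (Or.inr (Or.inl h))),
          toF _ (fun h => c1 (Or.inr (Or.inr h))), trivial⟩
      by_cases c2 : ("school".toList <:+: t ∨ "homework".toList <:+: t ∨ "teacher".toList <:+: t ∨ "exam".toList <:+: t ∨ "study".toList <:+: t)
      · have h2 : best ≤ 2 := by
          refine (hle 2).mpr (Or.inr ?_)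
          rcases c2 with h | h | h | h | h
          · exact ⟨("school".toList, 2), by simp [kwPriority], le_rfl, h⟩
          · exact ⟨("homework".toList, 2), by simp [kwPriority], le_rfl, h⟩
          · exact ⟨("teacher".toList, 2), by simp [kwPriority], le_rfl, h⟩
          · exact ⟨("exam".toList, 2), by simp [kwPriority], le_rfl, h⟩
          · exact ⟨("study".toList, 2), by simp [kwPriority], le_rfl, h⟩
        have h1 : ¬ best ≤ 1 := by
          rw [hle 1]
          rintro (h | ⟨kp, hm, hp, hin⟩)
          · omega
          · revert hm; rw [kwPriority]; intro hm
            fin_cases hm <;> simp_all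
        have hb : best = 2 := by omega
        have b2 : (["school", "homework", "teacher", "exam", "study"].any (fun w => PySem.Str.isIn w s)) = true := by
          simp only [List.any_cons, List.any_nil, Bool.or_eq_true]
          rcases c2 with h | h | h | h | h
          · exact Or.inl ((toT _).mpr h)
          · exact Or.inr (Or.inl ((toT _).mpr h))
          · exact Or.inr (Or.inr (Or.inl ((toT _).mpr h)))
          · exact Or.inr (Or.inr (Or.inr (Or.inl ((toT _).mpr h))))
          · exact Or.inr (Or.inr (Or.inr (Or.inr (Or.inl ((toT _).mpr h)))))
        rw [hb, b0, b1, b2]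
        simp [PySem.List.pyGet?, PySem.List.pyIdx?, topicsTuple]
      · have b2 : (["school", "homework", "teacher", "exam", "study"].any (fun w => PySem.Str.isIn w s)) = false := by
          simp only [List.any_cons, List.any_nil, Bool.or_eq_false_iff]
          exact ⟨toF _ (fun h => c2 (Or.inl h)), toF _ (fun h => c2 (Or.inr (Or.inl h))),
            toF _ (fun h => c2 (Or.inr (Or.inr (Or.inl h)))), toF _ (fun h => c2 (Or.inr (Or.inr (Or.inr (Or.inl h))))),
            toF _ (fun h => c2 (Or.inr (Or.inr (Or.inr (Or.inr h))))), trivial⟩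
        by_cases c3 : ("joke".toList <:+: t ∨ "funny".toList <:+: t ∨ "tell me a joke".toList <:+: t)
        · have h3 : best ≤ 3 := by
            refine (hle 3).mpr (Or.inr ?_)
            rcases c3 with h | h | h
            · exact ⟨("joke".toList, 3), by simp [kwPriority], le_rfl, h⟩
            · exact ⟨("funny".toList, 3), by simp [kwPriority], le_rfl, h⟩
            · exact ⟨("tell me a joke".toList, 3), by simp [kwPriority], le_rfl, h⟩
          have h2 : ¬ best ≤ 2 := by
            rw [hle 2]
            rintro (h | ⟨kp, hm, hp, hin⟩)
            · omega
            · revert hm; rw [kwPriority]; intro hm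
              fin_cases hm <;> simp_all
          have hb : best = 3 := by omega
          have b3 : (PySem.Str.isIn "joke" s || PySem.Str.isIn "funny" s || PySem.Str.isIn "tell me a joke" s) = true := by
            simp only [Bool.or_eq_true]
            rcases c3 with h | h | h
            · exact Or.inl (Or.inl ((toT _).mpr h))
            · exact Or.inl (Or.inr ((toT _).mpr h))
            · exact Or.inr ((toT _).mpr h)
          rw [hb, b0, b1, b2, b3]
          simp [PySem.List.pyGet?, PySem.List.pyIdx?, topicsTuple]
        · have h3 : ¬ best ≤ 3 := by
            rw [hle 3]
            rintro (h | ⟨kp, hm, hp, hin⟩)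
            · omega
            · revert hm; rw [kwPriority]; intro hm
              fin_cases hm <;> simp_all
          have hb : best = 4 := by omega
          have b3 : (PySem.Str.isIn "joke" s || PySem.Str.isIn "funny" s || PySem.Str.isIn "tell me a joke" s) = false := by
            simp only [Bool.or_eq_false_iff]
            exact ⟨⟨toF _ (fun h => c3 (Or.inl h)), toF _ (fun h => c3 (Or.inr (Or.inl h)))⟩,
              toF _ (fun h => c3 (Or.inr (Or.inr h)))⟩
          rw [hb, b0, b1, b2, b3]
          simp
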